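-- pv_equiv track=rewrite | github.com/jsenecal/netbox-notices | vendor_notification/timeline_utils.py | categorize_change
-- ===== SOURCE A (Python) =====
-- def categorize_change(changed_object_model, action, prechange_data, postchange_data):
--     """
--     Categorize an ObjectChange based on what changed.
--
--     Priority order (if multiple fields changed):
--     1. Status changes
--     2. Impact/Notification changes (structural)
--     3. Time changes
--     4. Acknowledgment changes
--     5. Other fields
--
--     Args:
--         changed_object_model: Model name (e.g., 'maintenance', 'impact')
--         action: 'create', 'update', or 'delete'
--         prechange_data: Dict of field values before change (or None)
--         postchange_data: Dict of field values after change (or None)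
--
--     Returns:
--         Category string: 'status', 'impact', 'notification', 'acknowledgment', 'time', or 'standard'
--     """
--     # Handle related object changes
--     if changed_object_model == 'impact':
--         return 'impact'
--
--     if changed_object_model == 'eventnotification':
--         return 'notification'
--
--     # Handle field changes in maintenance/outage objects
--     if action == 'update' and prechange_data and postchange_data:
--         # Priority 1: Status changes
--         if 'status' in postchange_data and prechange_data.get('status') != postchange_data.get('status'):
--             return 'status'
--
--         # Priority 2: Time changes
--         time_fields = ['start', 'end', 'estimated_time_to_repair']
--         for field in time_fields:
--             if field in postchange_data and prechange_data.get(field) != postchange_data.get(field):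
--                 return 'time'
--
--         # Priority 3: Acknowledgment changes
--         if 'acknowledged' in postchange_data and prechange_data.get('acknowledged') != postchange_data.get('acknowledged'):
--             return 'acknowledgment'
--
--     # Default: standard change
--     return 'standard'
-- ===== SOURCE B (Python) =====
-- def categorize_change(changed_object_model, action, prechange_data, postchange_data):
--     if changed_object_model == 'impact':
--         return 'impact'
--     if changed_object_model == 'eventnotification':
--         return 'notification'
--     if action == 'update' and prechange_data and postchange_data:
--         changed = {f for f in postchange_data
--                    if prechange_data.get(f) != postchange_data.get(f)}
--         if 'status' in changed:
--             return 'status'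
--         if changed & {'start', 'end', 'estimated_time_to_repair'}:
--             return 'time'
--         if 'acknowledged' in changed:
--             return 'acknowledgment'
--     return 'standard'
-- ===== Notes on version B (the rewrite author's own statement) =====
-- stated objective: alternative
-- what changed: Instead of testing each priority field against the dicts one by one with early returns, B first builds the set of actually-changed fields in one scan of postchange_data and then classifies by set membership/intersection in priority order.
import Mathlib
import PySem

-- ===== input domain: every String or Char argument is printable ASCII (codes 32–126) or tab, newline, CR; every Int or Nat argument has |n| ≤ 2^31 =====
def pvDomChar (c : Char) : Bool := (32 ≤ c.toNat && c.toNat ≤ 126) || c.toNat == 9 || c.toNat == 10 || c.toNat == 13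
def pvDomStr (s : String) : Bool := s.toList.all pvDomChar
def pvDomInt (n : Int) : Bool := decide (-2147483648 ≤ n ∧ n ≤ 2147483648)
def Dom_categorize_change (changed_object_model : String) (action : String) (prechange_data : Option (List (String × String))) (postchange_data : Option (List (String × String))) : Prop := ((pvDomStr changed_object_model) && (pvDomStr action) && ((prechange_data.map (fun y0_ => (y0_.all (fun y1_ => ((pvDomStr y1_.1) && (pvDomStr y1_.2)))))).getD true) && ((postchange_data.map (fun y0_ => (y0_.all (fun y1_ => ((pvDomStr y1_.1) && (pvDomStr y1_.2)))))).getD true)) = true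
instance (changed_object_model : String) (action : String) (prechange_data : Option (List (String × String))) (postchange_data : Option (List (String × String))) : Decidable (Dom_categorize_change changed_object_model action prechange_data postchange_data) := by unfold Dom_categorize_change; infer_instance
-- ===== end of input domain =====

-- B replaces A's field-by-field early-return probing by one scan of postchange_data building the
-- set of changed fields, followed by membership/intersection tests in the same priority order
-- (objective: alternative decomposition, same cost).

-- ===== PORT A =====
-- the 'for field in time_fields' loop with its early return; on fall-through it continues
-- with A's acknowledgment check and the default return
def pvATimeLoop (preD postD : List (String × String)) : List String → String
  | [] =>
      if "acknowledged" ∈ (PySem.Dict.mk postD).keys ∧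
         (PySem.Dict.mk preD).get? "acknowledged" ≠ (PySem.Dict.mk postD).get? "acknowledged"
      then "acknowledgment" else "standard"
  | f :: rest =>
      if f ∈ (PySem.Dict.mk postD).keys ∧
         (PySem.Dict.mk preD).get? f ≠ (PySem.Dict.mk postD).get? f
      then "time" else pvATimeLoop preD postD rest

def categorize_change (changed_object_model : String) (action : String) (prechange_data : Option (List (String × String))) (postchange_data : Option (List (String × String))) : String :=
  if changed_object_model = "impact" then "impact"
  else if changed_object_model = "eventnotification" then "notification"
  else
    match prechange_data, postchange_data with
    | some preD, some postD =>
        -- 'prechange_data and postchange_data': a dict is truthy iff non-empty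
        if action = "update" ∧ preD ≠ [] ∧ postD ≠ [] then
          if "status" ∈ (PySem.Dict.mk postD).keys ∧ (PySem.Dict.mk preD).get? "status" ≠ (PySem.Dict.mk postD).get? "status"
          then "status"
          else pvATimeLoop preD postD ["start", "end", "estimated_time_to_repair"]
        else "standard"
    | _, _ => "standard"

-- ===== PORT B =====
def categorize_change_alt (changed_object_model : String) (action : String) (prechange_data : Option (List (String × String))) (postchange_data : Option (List (String × String))) : String :=
  if changed_object_model = "impact" then "impact"
  else if changed_object_model = "eventnotification" then "notification"
  else
    match prechange_data with
    | none => "standard"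
    | some preD =>
      match postchange_data with
      | none => "standard"
      | some postD =>
        if action = "update" ∧ preD ≠ [] ∧ postD ≠ [] then
          -- changed = {f for f in postchange_data if prechange_data.get(f) != postchange_data.get(f)}
          let changed : PySem.Set String :=
            PySem.Set.ofList (((PySem.Dict.mk postD).keys).filter
              (fun f => (PySem.Dict.mk preD).get? f != (PySem.Dict.mk postD).get? f))
          if "status" ∈ changed then "status"
          else if PySem.Set.inter changed
                 (PySem.Set.ofList ["start", "end", "estimated_time_to_repair"]) ≠ [] then "time"
          else if "acknowledged" ∈ changed then "acknowledgment"
          else "standard"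
        else "standard"

-- ===== PRECONDITION & SPEC =====
def Spec_categorize_change (changed_object_model : String) (action : String) (prechange_data : Option (List (String × String))) (postchange_data : Option (List (String × String))) (out : String) : Prop := out = categorize_change_alt changed_object_model action prechange_data postchange_data
instance (changed_object_model : String) (action : String) (prechange_data : Option (List (String × String))) (postchange_data : Option (List (String × String))) (out : String) : Decidable (Spec_categorize_change changed_object_model action prechange_data postchange_data out) := by unfold Spec_categorize_change; infer_instance

-- ===== CLAIM (what is proved, stated in full; the proofs are below) =====
def Claim_equal_categorize_change : Prop := ∀ (changed_object_model : String) (action : String) (prechange_data : Option (List (String × String))) (postchange_data : Option (List (String × String))), Dom_categorize_change changed_object_model action prechange_data postchange_data → Spec_categorize_change changed_object_model action prechange_data postchange_data (categorize_change changed_object_model action prechange_data postchange_data)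

-- ===== LEMMAS AND PROOFS =====
-- membership in B's changed-set, characterised by the conditions A tests field-by-field
theorem mem_changed (preD postD : List (String × String)) (f : String) :
    f ∈ PySem.Set.ofList (((PySem.Dict.mk postD).keys).filter
        (fun g => (PySem.Dict.mk preD).get? g != (PySem.Dict.mk postD).get? g)) ↔
    f ∈ (PySem.Dict.mk postD).keys ∧
      (PySem.Dict.mk preD).get? f ≠ (PySem.Dict.mk postD).get? f := by
  simp [PySem.Set.mem_ofList, List.mem_filter]

-- B's intersection test, characterised by the three conditions A's time loop tests in turn
theorem inter_changed (preD postD : List (String × String)) :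
    (PySem.Set.inter
        (PySem.Set.ofList (((PySem.Dict.mk postD).keys).filter
          (fun g => (PySem.Dict.mk preD).get? g != (PySem.Dict.mk postD).get? g)))
        (PySem.Set.ofList ["start", "end", "estimated_time_to_repair"]) ≠ []) ↔
      (("start" ∈ (PySem.Dict.mk postD).keys ∧ (PySem.Dict.mk preD).get? "start" ≠ (PySem.Dict.mk postD).get? "start") ∨ ("end" ∈ (PySem.Dict.mk postD).keys ∧ (PySem.Dict.mk preD).get? "end" ≠ (PySem.Dict.mk postD).get? "end") ∨ ("estimated_time_to_repair" ∈ (PySem.Dict.mk postD).keys ∧ (PySem.Dict.mk preD).get? "estimated_time_to_repair" ≠ (PySem.Dict.mk postD).get? "estimated_time_to_repair")) := by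
  rw [← List.isEmpty_eq_false_iff, List.isEmpty_eq_false_iff_exists_mem]
  constructor
  · rintro ⟨x, hx⟩
    rw [PySem.Set.mem_inter] at hx
    obtain ⟨hx1, hx2⟩ := hx
    rw [mem_changed] at hx1
    simp only [PySem.Set.mem_ofList, List.mem_cons] at hx2
    rcases hx2 with h | h | h | h
    · exact Or.inl (h ▸ hx1)
    · exact Or.inr (Or.inl (h ▸ hx1))
    · exact Or.inr (Or.inr (h ▸ hx1))
    · simp at h
  · rintro (h | h | h)
    · exact ⟨"start", by rw [PySem.Set.mem_inter, mem_changed]; exact ⟨h, by simp⟩⟩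
    · exact ⟨"end", by rw [PySem.Set.mem_inter, mem_changed]; exact ⟨h, by simp⟩⟩
    · exact ⟨"estimated_time_to_repair",
        by rw [PySem.Set.mem_inter, mem_changed]; exact ⟨h, by simp⟩⟩

-- ===== VERDICT (by name: the statement is the Claim_ definition above) =====
theorem categorize_change_spec : Claim_equal_categorize_change := by
  intro m a pre post _
  unfold Spec_categorize_change categorize_change categorize_change_alt
  by_cases hm : m = "impact"
  · simp [hm]
  · by_cases hn : m = "eventnotification"
    · simp [hn]
    · simp only [if_neg hm, if_neg hn]
      cases pre with
      | none => rfl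
      | some preD =>
        cases post with
        | none => rfl
        | some postD =>
          dsimp only
          by_cases hg : a = "update" ∧ preD ≠ [] ∧ postD ≠ []
          · rw [if_pos hg, if_pos hg]
            by_cases hs : "status" ∈ (PySem.Dict.mk postD).keys ∧ (PySem.Dict.mk preD).get? "status" ≠ (PySem.Dict.mk postD).get? "status"
            · rw [if_pos hs, if_pos ((mem_changed preD postD "status").mpr hs)]
            · rw [if_neg hs, if_neg (fun h => hs ((mem_changed preD postD "status").mp h))]
              by_cases ht : ("start" ∈ (PySem.Dict.mk postD).keys ∧ (PySem.Dict.mk preD).get? "start" ≠ (PySem.Dict.mk postD).get? "start") ∨ ("end" ∈ (PySem.Dict.mk postD).keys ∧ (PySem.Dict.mk preD).get? "end" ≠ (PySem.Dict.mk postD).get? "end") ∨ ("estimated_time_to_repair" ∈ (PySem.Dict.mk postD).keys ∧ (PySem.Dict.mk preD).get? "estimated_time_to_repair" ≠ (PySem.Dict.mk postD).get? "estimated_time_to_repair")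
              · rw [if_pos ((inter_changed preD postD).mpr ht)]
                simp only [pvATimeLoop]
                rcases ht with h | h | h
                · rw [if_pos h]
                · by_cases h1 : "start" ∈ (PySem.Dict.mk postD).keys ∧ (PySem.Dict.mk preD).get? "start" ≠ (PySem.Dict.mk postD).get? "start"
                  · rw [if_pos h1]
                  · rw [if_neg h1, if_pos h]
                · by_cases h1 : "start" ∈ (PySem.Dict.mk postD).keys ∧ (PySem.Dict.mk preD).get? "start" ≠ (PySem.Dict.mk postD).get? "start"
                  · rw [if_pos h1]
                  · rw [if_neg h1]
                    by_cases h2 : "end" ∈ (PySem.Dict.mk postD).keys ∧ (PySem.Dict.mk preD).get? "end" ≠ (PySem.Dict.mk postD).get? "end"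
                    · rw [if_pos h2]
                    · rw [if_neg h2, if_pos h]
              · rw [if_neg (fun h => ht ((inter_changed preD postD).mp h))]
                have h1 := fun h => ht (Or.inl h)
                have h2 := fun h => ht (Or.inr (Or.inl h))
                have h3 := fun h => ht (Or.inr (Or.inr h))
                simp only [pvATimeLoop]
                rw [if_neg h1, if_neg h2, if_neg h3]
                by_cases ha : "acknowledged" ∈ (PySem.Dict.mk postD).keys ∧ (PySem.Dict.mk preD).get? "acknowledged" ≠ (PySem.Dict.mk postD).get? "acknowledged"
                · rw [if_pos ha, if_pos ((mem_changed preD postD "acknowledged").mpr ha)]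
                · rw [if_neg ha, if_neg (fun h => ha ((mem_changed preD postD "acknowledged").mp h))]
          · rw [if_neg hg, if_neg hg]
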